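-- pv_equiv track=rewrite | github.com/Pzqqt/MaoMiAV_Videos_Downloader | mmav.py | set_jobs
-- ===== SOURCE A (Python) =====
-- def set_jobs(jobs):
--     if jobs <= 1:
--         return 1
--     if jobs >= 32:
--         return 32
--     jobs_list = [2**x for x in range(6)]
--     for x in range(5):
--         if jobs_list[x] <= jobs < jobs_list[x+1]:
--             return jobs_list[x]
-- ===== SOURCE B (Python) =====
-- def set_jobs(jobs):
--     if jobs <= 1:
--         return 1
--     if jobs >= 32:
--         return 32
--     result = 1
--     while result * 2 <= jobs:
--         result *= 2
--     return result
-- ===== Notes on version B (the rewrite author's own statement) =====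
-- stated objective: simpler
-- what changed: Replaced the precomputed power-of-two table and the bracket-scan loop over range(5) with an iterative doubling accumulator (result*=2 while result*2<=jobs), building no list.
import Mathlib
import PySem

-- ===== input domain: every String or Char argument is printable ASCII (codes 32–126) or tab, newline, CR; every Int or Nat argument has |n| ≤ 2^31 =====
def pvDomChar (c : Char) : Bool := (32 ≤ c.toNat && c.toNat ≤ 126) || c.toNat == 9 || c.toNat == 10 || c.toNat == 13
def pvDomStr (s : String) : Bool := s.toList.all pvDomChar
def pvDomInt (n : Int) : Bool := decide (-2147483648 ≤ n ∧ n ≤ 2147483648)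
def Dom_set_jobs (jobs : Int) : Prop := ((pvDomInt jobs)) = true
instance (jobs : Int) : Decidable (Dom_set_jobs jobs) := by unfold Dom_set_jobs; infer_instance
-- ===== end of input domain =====

-- B replaces A's precomputed power-of-two table and bracket scan with an iterative doubling accumulator (simpler).


-- ===== PORT A =====
-- the 'for x in range(5)' loop with early return; falling through (Python: None) is
-- unreachable for 1 < jobs < 32, the returned 0 there is never exercised
def set_jobs_loop (jobs : Int) (jobs_list : List Int) : List Int → Int
  | [] => 0
  | x :: xs =>
    if PySem.List.pyGetD jobs_list x 0 ≤ jobs ∧ jobs < PySem.List.pyGetD jobs_list (x + 1) 0 then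
      PySem.List.pyGetD jobs_list x 0
    else set_jobs_loop jobs jobs_list xs

def set_jobs (jobs : Int) : Int :=
  if jobs ≤ 1 then 1
  else if jobs ≥ 32 then 32
  else
    let jobs_list := (PySem.List.pyRange 0 6 1).map (fun x => (2 : Int) ^ x.toNat)
    set_jobs_loop jobs jobs_list (PySem.List.pyRange 0 5 1)

-- ===== PORT B =====
-- 'while result*2 <= jobs: result *= 2'; fuel bounds the loop (guards ensure jobs ≤ 31, so 64 is ample)
def set_jobs_grow (jobs : Int) : Nat → Int → Int
  | 0, result => result
  | n + 1, result => if result * 2 ≤ jobs then set_jobs_grow jobs n (result * 2) else result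

def set_jobs_alt (jobs : Int) : Int :=
  if jobs ≤ 1 then 1
  else if jobs ≥ 32 then 32
  else set_jobs_grow jobs 64 1

-- ===== PRECONDITION & SPEC =====
def Spec_set_jobs (jobs : Int) (out : Int) : Prop := out = set_jobs_alt jobs
instance (jobs : Int) (out : Int) : Decidable (Spec_set_jobs jobs out) := by unfold Spec_set_jobs; infer_instance

-- ===== CLAIM (what is proved, stated in full; the proofs are below) =====
def Claim_equal_set_jobs : Prop := ∀ (jobs : Int), Dom_set_jobs jobs → Spec_set_jobs jobs (set_jobs jobs)

-- ===== LEMMAS AND PROOFS =====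

-- ===== VERDICT (by name: the statement is the Claim_ definition above) =====
theorem set_jobs_spec : Claim_equal_set_jobs := by
  unfold Claim_equal_set_jobs Spec_set_jobs
  intro jobs _
  by_cases h1 : jobs ≤ 1
  · simp [set_jobs, set_jobs_alt, h1]
  · by_cases h2 : jobs ≥ 32
    · simp [set_jobs, set_jobs_alt, h1, h2]
    · have hlo : 2 ≤ jobs := by omega
      have hhi : jobs ≤ 31 := by omega
      interval_cases jobs <;> decide
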